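-- pv_equiv track=rewrite | github.com/dohlee/python-dohlee | src/dohlee/seq/rrbs.py | get_concordancy_counters1
-- ===== SOURCE A (Python) =====
-- import itertools
-- from collections import defaultdict, Counter
--
-- def get_concordancy_counters1(coordinates, reads_binarized):
--     concordant_counter, discordant_counter = Counter(), Counter()
--     for read_binarized in reads_binarized:
--         indexed_cpgs = [(idx, cpg) for idx, cpg in zip(coordinates, read_binarized)]
--         for (idx1, cpg1), (idx2, cpg2) in itertools.combinations(indexed_cpgs, 2):
--             dist = abs(idx2 - idx1)
--             if cpg1 == cpg2:
--                 concordant_counter[dist] += 1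
--             else:
--                 discordant_counter[dist] += 1
--
--     return concordant_counter, discordant_counter
-- ===== SOURCE B (Python) =====
-- from collections import Counter
--
-- def _pair_events(cpgs):
--     # peel head against the rest, collecting (distance, concordant?) events in order
--     events = []
--     while cpgs:
--         (c1, b1), cpgs = cpgs[0], cpgs[1:]
--         events += [(abs(c2 - c1), b1 == b2) for c2, b2 in cpgs]
--     return events
--
-- def get_concordancy_counters1(coordinates, reads_binarized):
--     events = []
--     for read_binarized in reads_binarized:
--         events += _pair_events(list(zip(coordinates, read_binarized)))
--     concordant = Counter(d for d, same in events if same)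
--     discordant = Counter(d for d, same in events if not same)
--     return concordant, discordant
-- ===== Notes on version B (the rewrite author's own statement) =====
-- stated objective: alternative
-- what changed: B splits A's single interleaved loop (itertools.combinations with per-pair increments into two Counters) into two phases: it first materializes the flat (distance, concordant?) event stream by peeling each read's head CpG against the rest, then builds both Counters in bulk from the filtered stream.
import Mathlib
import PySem

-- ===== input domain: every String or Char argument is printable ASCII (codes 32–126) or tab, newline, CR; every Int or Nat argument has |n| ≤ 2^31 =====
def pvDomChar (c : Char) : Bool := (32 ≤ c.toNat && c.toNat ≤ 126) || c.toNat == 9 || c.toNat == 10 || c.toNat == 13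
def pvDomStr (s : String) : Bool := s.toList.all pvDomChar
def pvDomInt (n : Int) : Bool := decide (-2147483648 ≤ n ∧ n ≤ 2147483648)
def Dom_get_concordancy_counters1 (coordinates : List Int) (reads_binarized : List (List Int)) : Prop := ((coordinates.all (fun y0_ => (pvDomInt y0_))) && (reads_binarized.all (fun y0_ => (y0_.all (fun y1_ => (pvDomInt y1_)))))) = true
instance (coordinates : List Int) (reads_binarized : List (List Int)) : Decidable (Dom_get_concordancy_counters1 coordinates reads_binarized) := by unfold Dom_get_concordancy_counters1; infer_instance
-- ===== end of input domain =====

-- B replaces A's interleaved per-pair counter increments by a two-phase decomposition: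
-- materialize the (distance, concordant?) event stream, then build both Counters in bulk (objective: alternative).

-- ===== PORT A =====
-- itertools.combinations(xs, 2), in Python's order
def pvCombos2 : List (Int × Int) → List ((Int × Int) × (Int × Int))
  | [] => []
  | x :: rest => rest.map (fun y => (x, y)) ++ pvCombos2 rest

def get_concordancy_counters1 (coordinates : List Int) (reads_binarized : List (List Int)) : (List (Int × Int)) × (List (Int × Int)) :=
  let st := reads_binarized.foldl (fun (st : PySem.Dict Int Int × PySem.Dict Int Int) read_binarized =>
    let indexed_cpgs := coordinates.zip read_binarized
    (pvCombos2 indexed_cpgs).foldl (fun st pr =>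
      let dist := |pr.2.1 - pr.1.1|
      if pr.1.2 == pr.2.2 then (st.1.modify dist 0 (· + 1), st.2)
      else (st.1, st.2.modify dist 0 (· + 1))) st)
    (PySem.Dict.empty, PySem.Dict.empty)
  (st.1.items, st.2.items)

-- ===== PORT B =====
-- _pair_events: peel head against the rest, collecting (distance, concordant?) events
def pvPairEvents : List (Int × Int) → List (Int × Bool)
  | [] => []
  | (c1, b1) :: rest => rest.map (fun cb => (|cb.1 - c1|, b1 == cb.2)) ++ pvPairEvents rest

def get_concordancy_counters1_alt (coordinates : List Int) (reads_binarized : List (List Int)) : (List (Int × Int)) × (List (Int × Int)) :=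
  let events := reads_binarized.foldl (fun acc read_binarized => acc ++ pvPairEvents (coordinates.zip read_binarized)) []
  let concordant := PySem.Dict.counter ((events.filter (fun e => e.2)).map (fun e => e.1))
  let discordant := PySem.Dict.counter ((events.filter (fun e => !e.2)).map (fun e => e.1))
  (concordant.items, discordant.items)

-- ===== PRECONDITION & SPEC =====
def Spec_get_concordancy_counters1 (coordinates : List Int) (reads_binarized : List (List Int)) (out : (List (Int × Int)) × (List (Int × Int))) : Prop := out = get_concordancy_counters1_alt coordinates reads_binarized
instance (coordinates : List Int) (reads_binarized : List (List Int)) (out : (List (Int × Int)) × (List (Int × Int))) : Decidable (Spec_get_concordancy_counters1 coordinates reads_binarized out) := by unfold Spec_get_concordancy_counters1; infer_instance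

-- ===== CLAIM (what is proved, stated in full; the proofs are below) =====
def Claim_equal_get_concordancy_counters1 : Prop := ∀ (coordinates : List Int) (reads_binarized : List (List Int)), Dom_get_concordancy_counters1 coordinates reads_binarized → Spec_get_concordancy_counters1 coordinates reads_binarized (get_concordancy_counters1 coordinates reads_binarized)

-- ===== LEMMAS AND PROOFS =====

-- the per-pair step of A, seen as a step on (distance, concordant?) events
def pvEvStep (st : PySem.Dict Int Int × PySem.Dict Int Int) (e : Int × Bool) : PySem.Dict Int Int × PySem.Dict Int Int :=
  if e.2 then (st.1.modify e.1 0 (· + 1), st.2) else (st.1, st.2.modify e.1 0 (· + 1))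

lemma pvPairEvents_eq_combos (xs : List (Int × Int)) :
    pvPairEvents xs = (pvCombos2 xs).map (fun pr => (|pr.2.1 - pr.1.1|, pr.1.2 == pr.2.2)) := by
  induction xs with
  | nil => rfl
  | cons x rest ih =>
    cases x with
    | mk c1 b1 => simp [pvPairEvents, pvCombos2, ih, List.map_map, Function.comp]

lemma pvFoldA_eq_foldEv (xs : List (Int × Int)) (st : PySem.Dict Int Int × PySem.Dict Int Int) :
    (pvCombos2 xs).foldl (fun st pr =>
      let dist := |pr.2.1 - pr.1.1|
      if pr.1.2 == pr.2.2 then (st.1.modify dist 0 (· + 1), st.2)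
      else (st.1, st.2.modify dist 0 (· + 1))) st
    = (pvPairEvents xs).foldl pvEvStep st := by
  rw [pvPairEvents_eq_combos, List.foldl_map]
  rfl

lemma pvFoldEv_split (E : List (Int × Bool)) (c d : PySem.Dict Int Int) :
    E.foldl pvEvStep (c, d)
    = (((E.filter (fun e => e.2)).map (fun e => e.1)).foldl (fun d x => d.modify x 0 (· + 1)) c,
       ((E.filter (fun e => !e.2)).map (fun e => e.1)).foldl (fun d x => d.modify x 0 (· + 1)) d) := by
  induction E generalizing c d with
  | nil => rfl
  | cons e rest ih =>
    cases he : e.2 <;> simp [pvEvStep, he, ih]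

lemma pvFoldReads (coordinates : List Int) (reads : List (List Int)) (st : PySem.Dict Int Int × PySem.Dict Int Int) :
    reads.foldl (fun (st : PySem.Dict Int Int × PySem.Dict Int Int) read_binarized =>
      let indexed_cpgs := coordinates.zip read_binarized
      (pvCombos2 indexed_cpgs).foldl (fun st pr =>
        let dist := |pr.2.1 - pr.1.1|
        if pr.1.2 == pr.2.2 then (st.1.modify dist 0 (· + 1), st.2)
        else (st.1, st.2.modify dist 0 (· + 1))) st) st
    = (reads.flatMap (fun r => pvPairEvents (coordinates.zip r))).foldl pvEvStep st := by
  induction reads generalizing st with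
  | nil => rfl
  | cons r rest ih =>
    simp only [List.foldl_cons]
    rw [ih, pvFoldA_eq_foldEv, List.flatMap_cons, List.foldl_append]

-- ===== VERDICT (by name: the statement is the Claim_ definition above) =====
theorem get_concordancy_counters1_spec : Claim_equal_get_concordancy_counters1 := by
  intro coordinates reads_binarized _
  unfold Spec_get_concordancy_counters1 get_concordancy_counters1 get_concordancy_counters1_alt
  rw [PySem.List.foldl_append_eq_flatMap]
  rw [pvFoldReads, pvFoldEv_split]
  simp [PySem.Dict.counter_eq_foldl]
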